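-- pv_equiv track=rewrite | github.com/caleb765landis/Advent-Of-Code-2023-Solutions | day_1.py | getCalValStrs
-- ===== SOURCE A (Python) =====
-- class CalibratiionValueException(Exception):
--     def __init__(self, message):
--         self.message = message
--         super().__init__(self.message)
--
-- nums = {
--     "one": 1,
--     "two": 2,
--     "three": 3,
--     "four": 4,
--     "five": 5,
--     "six": 6,
--     "seven": 7,
--     "eight": 8,
--     "nine": 9,
--     "zero": 0
-- }
--
-- def getCalValStrs(line=""):
--     if len(line) == 0:
--         raise CalibratiionValueException("ERROR: Line cannot be empty.")
--
--     # find indexes for first and last appearances of an integer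
--
--     firstIntIndex = -1
--     lastIntIndex = -1
--
--     for i, char in enumerate(line):
--         if char.isdigit():
--             firstIntIndex = i
--             first = char
--             break
--
--     # get last digit
--     for i, char in enumerate(line[::-1]):
--         if char.isdigit():
--             lastIntIndex = len(line) - i - 1
--             last = char
--             break
--
--     # check if each number spelled out is in the line
--     # if it's found in the line, we can also compare it with the current first and last number appearances
--
--     for numStr, num in nums.items():
--         # find first appearance of substr
--         firstStrIndex = line.find(numStr)
--
--         # find last appearance of substr
--         lastStrIndex = line.rfind(numStr)
--
--         # if numStr was found in the line
--         if firstStrIndex != -1 or lastStrIndex != -1: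
--             # check if this is the first number that appears in the line
--
--             # if firstIntIndex's value is -1, then this is the first number that has been found, so set it as the first number that appears
--             if firstIntIndex == -1:
--                 first = str(num)
--                 firstIntIndex = firstStrIndex
--
--             # otherwise first number that appears has already been found,
--             # so compare that first number's index with this index to see if this appears first
--             # if this number's index is less than the current first appearing index, then this number appears first
--             elif firstIntIndex > firstStrIndex:
--                 first = str(num)
--                 firstIntIndex = firstStrIndex
--
--             # otherwise this spelled out number was found after another number in the list,
--             # so now check if this is the last number that appears in the line
--
--             # if lastIntIndex's value is -1, then this is the first number that has been found, so set it as the last number that appears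
--             if lastIntIndex == -1:
--                 last = str(num)
--                 lastIntIndex = lastStrIndex
--
--             # otherwise last number that appears has already been found,
--             # so compare that last number's index with this index to see if this appears last
--             # if this number's index is greater than the current last appearing index, then this number appears after
--             elif lastIntIndex < lastStrIndex:
--                 last = str(num)
--                 lastIntIndex = lastStrIndex
--
--     calVal = ""
--     calVal += first
--     calVal += last
--
--     if len(calVal) != 2:
--         raise CalibratiionValueException(
--             "ERROR: Calibration Value must be a 2 digit number.")
--
--     return int(calVal)
-- ===== SOURCE B (Python) =====
-- class CalibratiionValueException(Exception):
--     def __init__(self, message):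
--         self.message = message
--         super().__init__(self.message)
--
-- nums = {
--     "one": 1, "two": 2, "three": 3, "four": 4, "five": 5,
--     "six": 6, "seven": 7, "eight": 8, "nine": 9, "zero": 0
-- }
--
-- def getCalValStrs(line=""):
--     # Single left-to-right scan: at each index take the digit there, or the
--     # first spelled-out number starting there; first/last token give the value.
--     if len(line) == 0:
--         raise CalibratiionValueException("ERROR: Line cannot be empty.")
--     first = None
--     last = None
--     for i, ch in enumerate(line):
--         if ch.isdigit():
--             tok = ch
--         else:
--             tok = None
--             for word, num in nums.items():
--                 if line.startswith(word, i):
--                     tok = str(num)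
--                     break
--         if tok is not None:
--             if first is None:
--                 first = tok
--             last = tok
--     return int(first + last)
-- ===== Notes on version B (the rewrite author's own statement) =====
-- stated objective: alternative
-- what changed: Replaces A's three passes (forward digit scan, backward digit scan, then a per-word find/rfind pass with index bookkeeping) by one left-to-right scan that determines the token (digit or spelled word) starting at each position and keeps the first and last token seen.
import Mathlib
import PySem

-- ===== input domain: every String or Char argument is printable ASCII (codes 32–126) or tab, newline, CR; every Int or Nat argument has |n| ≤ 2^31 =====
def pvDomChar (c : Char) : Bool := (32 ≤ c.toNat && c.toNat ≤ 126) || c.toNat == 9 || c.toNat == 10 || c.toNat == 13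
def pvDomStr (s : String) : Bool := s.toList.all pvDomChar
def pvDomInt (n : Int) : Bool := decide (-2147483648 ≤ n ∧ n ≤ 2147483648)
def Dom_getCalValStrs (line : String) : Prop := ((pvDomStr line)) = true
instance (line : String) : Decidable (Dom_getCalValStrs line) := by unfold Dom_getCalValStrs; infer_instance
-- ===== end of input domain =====

-- B replaces A's three passes (forward/backward digit scans plus a per-word find/rfind pass)
-- by a single left-to-right scan keeping the first and last token; same return value on Pre_.

-- the module-level dict `nums`, in insertion order (shared constant of the module)
def pvWords : List (List Char × Int) :=
  [("one".toList, 1), ("two".toList, 2), ("three".toList, 3), ("four".toList, 4),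
   ("five".toList, 5), ("six".toList, 6), ("seven".toList, 7), ("eight".toList, 8),
   ("nine".toList, 9), ("zero".toList, 0)]

-- ===== PORT A =====
-- `for i, char in enumerate(line): if char.isdigit(): firstIntIndex = i; first = char; break`
def digitScanF : List (Int × Char) → Int × Option (List Char)
  | [] => (-1, none)
  | (i, c) :: rest =>
      if PySem.Chars.isdigit c then (i, some [c]) else digitScanF rest

-- `for i, char in enumerate(line[::-1]): if char.isdigit(): lastIntIndex = len(line) - i - 1; last = char; break`
def digitScanL (n : Int) : List (Int × Char) → Int × Option (List Char)
  | [] => (-1, none)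
  | (i, c) :: rest =>
      if PySem.Chars.isdigit c then (n - i - 1, some [c]) else digitScanL n rest

-- one iteration of `for numStr, num in nums.items(): ...`
def spellStep (cs : List Char) (st : (Int × Option (List Char)) × (Int × Option (List Char)))
    (p : List Char × Int) : (Int × Option (List Char)) × (Int × Option (List Char)) :=
  let fsi := PySem.Chars.find cs p.1
  let lsi := PySem.Chars.rfind cs p.1
  if fsi ≠ -1 ∨ lsi ≠ -1 then
    let fst' := if st.1.1 = -1 then (fsi, some (PySem.Int.toChars p.2))
                else if fsi < st.1.1 then (fsi, some (PySem.Int.toChars p.2))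
                else st.1
    let lst' := if st.2.1 = -1 then (lsi, some (PySem.Int.toChars p.2))
                else if st.2.1 < lsi then (lsi, some (PySem.Int.toChars p.2))
                else st.2
    (fst', lst')
  else st

def getCalValStrs (line : String) : Int :=
  let cs := line.toList
  if cs.length = 0 then 0  -- Python raises CalibratiionValueException; excluded by Pre_
  else
    let f0 := digitScanF (PySem.List.enumerate cs 0)
    let rev := (PySem.List.slice? cs none none (-1)).getD []   -- line[::-1]
    let l0 := digitScanL (cs.length : Int) (PySem.List.enumerate rev 0)
    let r := pvWords.foldl (spellStep cs) (f0, l0)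
    -- calVal = "" + first + last; NameError if first/last unbound: excluded by Pre_
    let calVal := (r.1.2).getD [] ++ (r.2.2).getD []
    if calVal.length ≠ 2 then 0  -- Python raises CalibratiionValueException; unreachable under Pre_
    else (PySem.Int.ofChars? calVal).getD 0

-- ===== PORT B =====
-- inner `for word, num in nums.items(): if line.startswith(word, i): tok = str(num); break`
def wordTok (suffix : List Char) : List (List Char × Int) → Option (List Char)
  | [] => none
  | (w, v) :: rest =>
      if PySem.Chars.startswith suffix w then some (PySem.Int.toChars v)
      else wordTok suffix rest

-- one iteration of `for i, ch in enumerate(line)`; `line.startswith(word, i)` (0 ≤ i) is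
-- exactly `startswith` on the suffix `line[i:]` — ported via slice, which is exact here.
def bStep (cs : List Char) (st : Option (List Char) × Option (List Char)) (p : Int × Char) :
    Option (List Char) × Option (List Char) :=
  let tok := if PySem.Chars.isdigit p.2 then some [p.2]
             else wordTok (PySem.List.slice cs (some p.1) none) pvWords
  match tok with
  | none => st
  | some t => (match st.1 with | some a => some a | none => some t, some t)

def getCalValStrs_alt (line : String) : Int :=
  let cs := line.toList
  if cs.length = 0 then 0  -- raise: excluded by Pre_
  else
    match (PySem.List.enumerate cs 0).foldl (bStep cs) (none, none) with
    | (some a, some b) => (PySem.Int.ofChars? (a ++ b)).getD 0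
    | _ => 0  -- first/last still None: Python raises; excluded by Pre_

-- ===== PRECONDITION & SPEC =====
-- Pre_ excludes exactly the inputs on which A raises: the empty line
-- (CalibratiionValueException) and non-empty lines containing neither a digit nor a
-- spelled-out number (NameError: `first`/`last` unbound).
def Pre_getCalValStrs (line : String) : Prop :=
  line.toList ≠ [] ∧
  (line.toList.any PySem.Chars.isdigit = true ∨
   pvWords.any (fun p => PySem.Chars.isIn p.1 line.toList) = true)
instance (line : String) : Decidable (Pre_getCalValStrs line) := by
  unfold Pre_getCalValStrs; infer_instance

def pvWitness_getCalValStrs : String := "a1b"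

def Spec_getCalValStrs (line : String) (out : Int) : Prop := out = getCalValStrs_alt line
instance (line : String) (out : Int) : Decidable (Spec_getCalValStrs line out) := by
  unfold Spec_getCalValStrs; infer_instance

-- ===== CLAIM (what is proved, stated in full; the proofs are below) =====
def Claim_equal_getCalValStrs : Prop :=
  ∀ (line : String), Dom_getCalValStrs line → Pre_getCalValStrs line →
    Spec_getCalValStrs line (getCalValStrs line)

-- ===== LEMMAS AND PROOFS =====

-- the token (digit or first matching spelled word of ws) starting at position i
def tokW (cs : List Char) (ws : List (List Char × Int)) (i : Nat) : Option (List Char) :=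
  match cs[i]? with
  | none => none
  | some c => if PySem.Chars.isdigit c then some [c] else wordTok (cs.drop i) ws

-- first token at position ≥ k, with its position
def firstP (cs : List Char) (ws : List (List Char × Int)) (k : Nat) : Option (Nat × List Char) :=
  if _h : k < cs.length then
    match tokW cs ws k with
    | some t => some (k, t)
    | none => firstP cs ws (k + 1)
  else none
termination_by cs.length - k

-- last token at position ≥ k, with its position
def lastSeg (cs : List Char) (ws : List (List Char × Int)) (k : Nat) : Option (Nat × List Char) :=
  if _h : k < cs.length then
    match lastSeg cs ws (k + 1) with
    | some p => some p
    | none => (tokW cs ws k).map (fun t => (k, t))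
  else none
termination_by cs.length - k

-- encoding of an optional (position, value) as A's (index, string) state
def encF : Option (Nat × List Char) → Int × Option (List Char)
  | none => (-1, none)
  | some (i, t) => ((i : Int), some t)

lemma firstP_none_iff (cs : List Char) (ws : List (List Char × Int)) (k : Nat) :
    firstP cs ws k = none ↔ ∀ j, k ≤ j → j < cs.length → tokW cs ws j = none := by
  fun_induction firstP cs ws k with
  | case1 k h t ht =>
    simp only [reduceCtorEq, false_iff, not_forall]
    exact ⟨k, le_rfl, h, by simp [ht]⟩
  | case2 k h ht ih =>
    rw [ih]
    constructor
    · intro H j hj hjl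
      rcases Nat.eq_or_lt_of_le hj with rfl | hlt
      · exact ht
      · exact H j hlt hjl
    · intro H j hj hjl; exact H j (by omega) hjl
  | case3 k h =>
    simp only [true_iff]
    intro j hj hjl; omega


lemma firstP_some_iff (cs : List Char) (ws : List (List Char × Int)) (k : Nat)
    (i : Nat) (t : List Char) :
    firstP cs ws k = some (i, t) ↔
      k ≤ i ∧ i < cs.length ∧ tokW cs ws i = some t ∧
        ∀ j, k ≤ j → j < i → tokW cs ws j = none := by
  fun_induction firstP cs ws k with
  | case1 k h t' ht =>
    constructor
    · intro he
      rw [Option.some.injEq, Prod.mk.injEq] at he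
      obtain ⟨rfl, rfl⟩ := he
      exact ⟨le_rfl, h, ht, fun j hj hjl => absurd hjl (by omega)⟩
    · rintro ⟨h1, h2, h3, h4⟩
      rcases Nat.eq_or_lt_of_le h1 with rfl | hlt
      · have : some t' = some t := ht.symm.trans h3
        rw [Option.some.injEq] at this
        rw [this]
      · exact absurd (h4 k le_rfl hlt) (by simp [ht])
  | case2 k h ht ih =>
    rw [ih]
    constructor
    · rintro ⟨h1, h2, h3, h4⟩
      refine ⟨by omega, h2, h3, fun j hj hjl => ?_⟩
      rcases Nat.eq_or_lt_of_le hj with rfl | hlt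
      · exact ht
      · exact h4 j hlt hjl
    · rintro ⟨h1, h2, h3, h4⟩
      refine ⟨?_, h2, h3, fun j hj hjl => h4 j (by omega) hjl⟩
      rcases Nat.eq_or_lt_of_le h1 with rfl | hlt
      · rw [ht] at h3; cases h3
      · omega
  | case3 k h =>
    simp only [reduceCtorEq, false_iff, not_and]
    intro h1 h2; omega

lemma lastSeg_none_iff (cs : List Char) (ws : List (List Char × Int)) (k : Nat) :
    lastSeg cs ws k = none ↔ ∀ j, k ≤ j → j < cs.length → tokW cs ws j = none := by
  fun_induction lastSeg cs ws k with
  | case1 k h p hp ih =>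
    simp only [reduceCtorEq, false_iff, not_forall]
    have hne : ¬ ∀ j, k + 1 ≤ j → j < cs.length → tokW cs ws j = none := by
      intro hall; rw [ih.mpr hall] at hp; cases hp
    push Not at hne
    obtain ⟨j, hj, hjl, hne⟩ := hne
    exact ⟨j, by omega, hjl, hne⟩
  | case2 k h hp ih =>
    constructor
    · intro hm j hj hjl
      by_cases hkj : j = k
      · subst hkj
        cases htk : tokW cs ws j with
        | none => rfl
        | some t => rw [htk] at hm; cases hm
      · exact (ih.mp hp) j (by omega) hjl
    · intro H
      rw [H k le_rfl h]; rfl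
  | case3 k h =>
    simp only [true_iff]
    intro j hj hjl; omega


lemma lastSeg_some_iff (cs : List Char) (ws : List (List Char × Int)) (k : Nat)
    (i : Nat) (t : List Char) :
    lastSeg cs ws k = some (i, t) ↔
      k ≤ i ∧ i < cs.length ∧ tokW cs ws i = some t ∧
        ∀ j, i < j → j < cs.length → tokW cs ws j = none := by
  fun_induction lastSeg cs ws k with
  | case1 k h p hp ih =>
    constructor
    · intro he
      rw [Option.some.injEq] at he
      subst he
      obtain ⟨h1, h2, h3, h4⟩ := ih.mp hp
      exact ⟨by omega, h2, h3, h4⟩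
    · rintro ⟨h1, h2, h3, h4⟩
      rcases Nat.eq_or_lt_of_le h1 with rfl | hlt
      · have hnone : lastSeg cs ws (k + 1) = none :=
          (lastSeg_none_iff cs ws (k + 1)).mpr (fun j hj hjl => h4 j (by omega) hjl)
        rw [hp] at hnone; cases hnone
      · exact hp.symm.trans (ih.mpr ⟨by omega, h2, h3, h4⟩)
  | case2 k h hp ih =>
    have hup : ∀ j, k + 1 ≤ j → j < cs.length → tokW cs ws j = none :=
      (lastSeg_none_iff cs ws (k + 1)).mp hp
    constructor
    · intro hm
      cases htk : tokW cs ws k with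
      | none => rw [htk] at hm; cases hm
      | some t' =>
        rw [htk] at hm
        rw [Option.map_some, Option.some.injEq, Prod.mk.injEq] at hm
        obtain ⟨rfl, rfl⟩ := hm
        exact ⟨le_rfl, h, htk, fun j hj hjl => hup j (by omega) hjl⟩
    · rintro ⟨h1, h2, h3, h4⟩
      rcases Nat.eq_or_lt_of_le h1 with rfl | hlt
      · rw [h3]; rfl
      · exact absurd (hup i (by omega) h2) (by simp [h3])
  | case3 k h =>
    simp only [reduceCtorEq, false_iff, not_and]
    intro h1 h2; omega


-- ---- rfind specification (derived here; the prelude exports only the definition) ----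
lemma rfind_go_cases (s sub : List Char) (k : Nat) :
    (PySem.Chars.rfind.go s sub k = -1 ∧ ∀ j, j ≤ k → ¬ sub <+: s.drop j) ∨
    (∃ j, j ≤ k ∧ PySem.Chars.rfind.go s sub k = (j : Int) ∧ sub <+: s.drop j ∧
      ∀ i, j < i → i ≤ k → ¬ sub <+: s.drop i) := by
  induction k with
  | zero =>
    by_cases h : sub.isPrefixOf s
    · exact Or.inr ⟨0, le_rfl, by simp [PySem.Chars.rfind.go, h],
        by simpa [List.isPrefixOf_iff_prefix] using h, fun i hi hik => by omega⟩
    · refine Or.inl ⟨by simp [PySem.Chars.rfind.go, h], ?_⟩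
      intro j hj
      interval_cases j
      simpa [List.isPrefixOf_iff_prefix] using h
  | succ k ih =>
    by_cases h : sub.isPrefixOf (s.drop (k + 1))
    · exact Or.inr ⟨k + 1, le_rfl, by simp [PySem.Chars.rfind.go, h],
        by simpa [List.isPrefixOf_iff_prefix] using h, fun i hi hik => by omega⟩
    · have hgo : PySem.Chars.rfind.go s sub (k + 1) = PySem.Chars.rfind.go s sub k := by
        simp [PySem.Chars.rfind.go, h]
      have hnot : ¬ sub <+: s.drop (k + 1) := by
        simpa [List.isPrefixOf_iff_prefix] using h
      rcases ih with ⟨he, hall⟩ | ⟨j, hj, he, hpre, habove⟩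
      · refine Or.inl ⟨hgo.trans he, ?_⟩
        intro j hj
        rcases Nat.eq_or_lt_of_le hj with rfl | hlt
        · exact hnot
        · exact hall j (by omega)
      · refine Or.inr ⟨j, by omega, hgo.trans he, hpre, ?_⟩
        intro i hi hik
        rcases Nat.eq_or_lt_of_le hik with rfl | hlt
        · exact hnot
        · exact habove i hi (by omega)


lemma prefix_drop_lt (s sub : List Char) (j : Nat) (hsub : sub ≠ [])
    (h : sub <+: s.drop j) : j < s.length := by
  by_contra hj
  rw [List.drop_eq_nil_of_le (by omega)] at h
  exact hsub (List.prefix_nil.mp h)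


lemma rfind_eq_neg_one_iff (s sub : List Char) (hsub : sub ≠ []) :
    PySem.Chars.rfind s sub = -1 ↔ ∀ j, ¬ sub <+: s.drop j := by
  have hdef : PySem.Chars.rfind s sub = PySem.Chars.rfind.go s sub s.length := rfl
  constructor
  · intro he j
    rcases rfind_go_cases s sub s.length with ⟨_, hall⟩ | ⟨i, hi, hgo, _, _⟩
    · by_cases hjl : j ≤ s.length
      · exact hall j hjl
      · rw [List.drop_eq_nil_of_le (by omega)]
        intro hp
        exact hsub (List.prefix_nil.mp hp)
    · rw [hdef, hgo] at he; omega
  · intro hall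
    rcases rfind_go_cases s sub s.length with ⟨he, _⟩ | ⟨i, hi, hgo, hpre, _⟩
    · exact hdef.trans he
    · exact absurd hpre (hall i)


lemma rfind_spec' (s sub : List Char) (hsub : sub ≠ [])
    (h : 0 ≤ PySem.Chars.rfind s sub) :
    sub <+: s.drop (PySem.Chars.rfind s sub).toNat ∧
      ∀ i, (PySem.Chars.rfind s sub).toNat < i → ¬ sub <+: s.drop i := by
  have hdef : PySem.Chars.rfind s sub = PySem.Chars.rfind.go s sub s.length := rfl
  rcases rfind_go_cases s sub s.length with ⟨he, _⟩ | ⟨j, hj, hgo, hpre, habove⟩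
  · rw [hdef, he] at h; omega
  · have hrj : PySem.Chars.rfind s sub = (j : Int) := hdef.trans hgo
    have htn : (PySem.Chars.rfind s sub).toNat = j := by rw [hrj]; exact Int.toNat_natCast j
    rw [htn]
    refine ⟨hpre, ?_⟩
    intro i hi
    by_cases hil : i ≤ s.length
    · exact habove i hi hil
    · rw [List.drop_eq_nil_of_le (by omega)]
      intro hp
      exact hsub (List.prefix_nil.mp hp)


lemma find_eq_neg_one_iff' (s sub : List Char) :
    PySem.Chars.find s sub = -1 ↔ ∀ j, ¬ sub <+: s.drop j := by
  rw [PySem.Chars.find_eq_neg_one_iff, ← PySem.Chars.isIn_iff_infix,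
    ← PySem.Chars.exists_prefix_drop_iff_isIn]
  exact not_exists


-- ---- tokW facts ----
lemma startswith_nil (w : List Char) (hw : w ≠ []) :
    PySem.Chars.startswith [] w = false := by
  cases w with
  | nil => exact absurd rfl hw
  | cons c cs => rfl


lemma wordTok_append (suffix : List Char) (ws : List (List Char × Int)) (w : List Char) (v : Int) :
    wordTok suffix (ws ++ [(w, v)]) =
      match wordTok suffix ws with
      | some t => some t
      | none => if PySem.Chars.startswith suffix w then some (PySem.Int.toChars v) else none := by
  induction ws with
  | nil =>
    show (if PySem.Chars.startswith suffix w then some (PySem.Int.toChars v) else wordTok suffix []) = _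
    cases h : PySem.Chars.startswith suffix w <;> simp [h, wordTok]
  | cons q rest ih =>
    obtain ⟨w', v'⟩ := q
    show (if PySem.Chars.startswith suffix w' then some (PySem.Int.toChars v')
          else wordTok suffix (rest ++ [(w, v)])) = _
    cases h : PySem.Chars.startswith suffix w' <;> simp [h, wordTok, ih]


lemma tokW_append (cs : List Char) (ws : List (List Char × Int)) (w : List Char) (v : Int)
    (hw : w ≠ []) (i : Nat) :
    tokW cs (ws ++ [(w, v)]) i =
      match tokW cs ws i with
      | some t => some t
      | none =>
          if PySem.Chars.startswith (cs.drop i) w then some (PySem.Int.toChars v) else none := by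
  unfold tokW
  cases hg : cs[i]? with
  | none =>
    have hlen : cs.length ≤ i := by
      by_contra hc
      rw [List.getElem?_eq_getElem (by omega)] at hg; cases hg
    rw [List.drop_eq_nil_of_le hlen, startswith_nil w hw]
    simp
  | some c =>
    by_cases hd : PySem.Chars.isdigit c
    · simp [hd]
    · simp only [hd, if_false, Bool.false_eq_true]
      exact wordTok_append (cs.drop i) ws w v



lemma tokW_append_of_some (cs : List Char) (ws : List (List Char × Int)) (w : List Char)
    (v : Int) (hw : w ≠ []) (i : Nat) (t : List Char) (h : tokW cs ws i = some t) :
    tokW cs (ws ++ [(w, v)]) i = some t := by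
  rw [tokW_append cs ws w v hw i, h]

lemma tokW_append_of_none (cs : List Char) (ws : List (List Char × Int)) (w : List Char)
    (v : Int) (hw : w ≠ []) (i : Nat) (h : tokW cs ws i = none)
    (hnp : ¬ w <+: cs.drop i) : tokW cs (ws ++ [(w, v)]) i = none := by
  rw [tokW_append cs ws w v hw i, h]
  have hs : PySem.Chars.startswith (cs.drop i) w = false := by
    rw [← Bool.not_eq_true, PySem.Chars.startswith_iff]; exact hnp
  simp [hs]

lemma tokW_append_of_none_pre (cs : List Char) (ws : List (List Char × Int)) (w : List Char)
    (v : Int) (hw : w ≠ []) (i : Nat) (h : tokW cs ws i = none)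
    (hp : w <+: cs.drop i) : tokW cs (ws ++ [(w, v)]) i = some (PySem.Int.toChars v) := by
  rw [tokW_append cs ws w v hw i, h]
  have hs : PySem.Chars.startswith (cs.drop i) w = true :=
    (PySem.Chars.startswith_iff _ _).mpr hp
  simp [hs]

lemma firstP_congr (cs : List Char) (ws ws' : List (List Char × Int))
    (h : ∀ i, tokW cs ws i = tokW cs ws' i) (k : Nat) :
    firstP cs ws k = firstP cs ws' k := by
  cases hf : firstP cs ws' k with
  | none =>
    exact (firstP_none_iff cs ws k).mpr
      (fun j a b => (h j).trans ((firstP_none_iff cs ws' k).mp hf j a b))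
  | some p =>
    obtain ⟨h1, h2, h3, h4⟩ := (firstP_some_iff cs ws' k p.1 p.2).mp (by rw [hf])
    exact (firstP_some_iff cs ws k p.1 p.2).mpr
      ⟨h1, h2, (h p.1).trans h3, fun j a b => (h j).trans (h4 j a b)⟩

lemma lastSeg_congr (cs : List Char) (ws ws' : List (List Char × Int))
    (h : ∀ i, tokW cs ws i = tokW cs ws' i) (k : Nat) :
    lastSeg cs ws k = lastSeg cs ws' k := by
  cases hf : lastSeg cs ws' k with
  | none =>
    exact (lastSeg_none_iff cs ws k).mpr
      (fun j a b => (h j).trans ((lastSeg_none_iff cs ws' k).mp hf j a b))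
  | some p =>
    obtain ⟨h1, h2, h3, h4⟩ := (lastSeg_some_iff cs ws' k p.1 p.2).mp (by rw [hf])
    exact (lastSeg_some_iff cs ws k p.1 p.2).mpr
      ⟨h1, h2, (h p.1).trans h3, fun j a b => (h j).trans (h4 j a b)⟩

lemma tokW_nil_eq (cs : List Char) (i : Nat) (h : i < cs.length) :
    tokW cs [] i = if PySem.Chars.isdigit cs[i] then some [cs[i]] else none := by
  unfold tokW
  rw [List.getElem?_eq_getElem h]
  cases hd : PySem.Chars.isdigit cs[i] <;> simp [hd, wordTok]

-- ---- A-side loop characterizations ----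
lemma digitScanF_eq (cs : List Char) (k : Nat) (hk : k ≤ cs.length) :
    digitScanF (PySem.List.enumerate (cs.drop k) (k : Int)) = encF (firstP cs [] k) := by
  suffices H : ∀ d k, k ≤ cs.length → cs.length - k = d →
      digitScanF (PySem.List.enumerate (cs.drop k) (k : Int)) = encF (firstP cs [] k) from
    H (cs.length - k) k hk rfl
  intro d
  induction d with
  | zero =>
    intro k hk hd
    have hke : k = cs.length := by omega
    subst hke
    rw [List.drop_length, PySem.List.enumerate_nil, firstP]
    simp [digitScanF, encF]
  | succ d ih =>
    intro k hk hd
    have hklt : k < cs.length := by omega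
    rw [List.drop_eq_getElem_cons hklt, PySem.List.enumerate_cons, firstP, dif_pos hklt,
      tokW_nil_eq cs k hklt]
    by_cases hdig : PySem.Chars.isdigit cs[k]
    · simp [digitScanF, hdig, encF]
    · simp only [digitScanF, hdig, Bool.false_eq_true, if_false]
      have hc : ((k : Int) + 1) = ((k + 1 : Nat) : Int) := by push_cast; ring
      rw [hc]
      exact ih (k + 1) (by omega) (by omega)


lemma digitScanL_eq (cs : List Char) :
    digitScanL (cs.length : Int) (PySem.List.enumerate cs.reverse 0) =
      encF (lastSeg cs [] 0) := by
  have hrl : cs.reverse.length = cs.length := List.length_reverse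
  have H : ∀ d j, j ≤ cs.length → cs.length - j = d →
      digitScanL (cs.length : Int) (PySem.List.enumerate (cs.reverse.drop j) (j : Int)) =
        (match firstP cs.reverse [] j with
         | none => ((-1 : Int), (none : Option (List Char)))
         | some p => ((cs.length : Int) - p.1 - 1, some p.2)) := by
    intro d
    induction d with
    | zero =>
      intro j hj hd
      have hje : j = cs.length := by omega
      subst hje
      rw [show cs.reverse.drop cs.length = [] from by rw [← hrl]; exact List.drop_length,
        PySem.List.enumerate_nil, firstP, dif_neg (by omega)]
      simp [digitScanL]
    | succ d ih =>
      intro j hj hd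
      have hjr : j < cs.reverse.length := by omega
      rw [List.drop_eq_getElem_cons hjr, PySem.List.enumerate_cons, firstP, dif_pos hjr,
        tokW_nil_eq cs.reverse j hjr]
      by_cases hdig : PySem.Chars.isdigit cs.reverse[j]
      · rw [List.getElem_reverse] at hdig
        simp [digitScanL, hdig]
      · simp only [digitScanL, hdig, Bool.false_eq_true, if_false]
        have hc : ((j : Int) + 1) = ((j + 1 : Nat) : Int) := by push_cast; ring
        rw [hc]
        exact ih (j + 1) (by omega) (by omega)
  have h0 := H cs.length 0 (by omega) (by omega)
  rw [List.drop_zero] at h0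
  rw [show ((0 : Nat) : Int) = 0 from rfl] at h0
  rw [h0]
  cases hfp : firstP cs.reverse [] 0 with
  | none =>
    have hnone : lastSeg cs [] 0 = none := by
      rw [lastSeg_none_iff]
      intro m hm hml
      have hrm : cs.length - 1 - m < cs.reverse.length := by omega
      have hth := (firstP_none_iff cs.reverse [] 0).mp hfp (cs.length - 1 - m) (by omega) hrm
      rw [tokW_nil_eq cs.reverse _ hrm, List.getElem_reverse] at hth
      rw [tokW_nil_eq cs m hml]
      have hidx : cs.length - 1 - (cs.length - 1 - m) = m := by omega
      simp only [hidx] at hth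
      exact hth
    rw [hnone]
    rfl
  | some p =>
    obtain ⟨i, t⟩ := p
    obtain ⟨h1, h2, h3, h4⟩ := (firstP_some_iff cs.reverse [] 0 i t).mp hfp
    have hsome : lastSeg cs [] 0 = some (cs.length - 1 - i, t) := by
      rw [lastSeg_some_iff]
      refine ⟨by omega, by omega, ?_, ?_⟩
      · rw [tokW_nil_eq cs.reverse i h2, List.getElem_reverse] at h3
        rw [tokW_nil_eq cs (cs.length - 1 - i) (by omega)]
        exact h3
      · intro j hjm hjl
        have hrj : cs.length - 1 - j < cs.reverse.length := by omega
        have hth := h4 (cs.length - 1 - j) (by omega) (by omega)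
        rw [tokW_nil_eq cs.reverse _ hrj, List.getElem_reverse] at hth
        rw [tokW_nil_eq cs j hjl]
        have hidx : cs.length - 1 - (cs.length - 1 - j) = j := by omega
        simp only [hidx] at hth
        exact hth
    rw [hsome]
    simp only [encF, Prod.mk.injEq]
    exact ⟨by omega, trivial⟩


lemma spellStep_eq (cs : List Char) (ws : List (List Char × Int)) (w : List Char) (v : Int)
    (hw : w ≠ []) :
    spellStep cs (encF (firstP cs ws 0), encF (lastSeg cs ws 0)) (w, v) =
      (encF (firstP cs (ws ++ [(w, v)]) 0), encF (lastSeg cs (ws ++ [(w, v)]) 0)) := by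
  by_cases hocc : ∀ j : Nat, ¬ w <+: cs.drop j
  · have hf : PySem.Chars.find cs w = -1 := (find_eq_neg_one_iff' cs w).mpr hocc
    have hr : PySem.Chars.rfind cs w = -1 := (rfind_eq_neg_one_iff cs w hw).mpr hocc
    have htok : ∀ i, tokW cs (ws ++ [(w, v)]) i = tokW cs ws i := by
      intro i
      cases h : tokW cs ws i with
      | some t => exact tokW_append_of_some cs ws w v hw i t h
      | none => exact tokW_append_of_none cs ws w v hw i h (hocc i)
    rw [firstP_congr cs (ws ++ [(w, v)]) ws htok 0, lastSeg_congr cs (ws ++ [(w, v)]) ws htok 0]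
    unfold spellStep
    simp [hf, hr]
  · push Not at hocc
    have hfne : PySem.Chars.find cs w ≠ -1 := by
      rw [Ne, find_eq_neg_one_iff']
      push Not
      exact hocc
    have h0f : 0 ≤ PySem.Chars.find cs w := by
      have := PySem.Chars.neg_one_le_find cs w
      omega
    obtain ⟨hfpre, hfmin⟩ := PySem.Chars.find_spec h0f
    have hrne : PySem.Chars.rfind cs w ≠ -1 := by
      rw [Ne, rfind_eq_neg_one_iff cs w hw]
      push Not
      exact hocc
    have h0r : 0 ≤ PySem.Chars.rfind cs w := by
      rcases rfind_go_cases cs w cs.length with ⟨he, _⟩ | ⟨j, _, he, _, _⟩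
      · exact absurd he hrne
      · rw [show PySem.Chars.rfind cs w = PySem.Chars.rfind.go cs w cs.length from rfl, he]
        omega
    obtain ⟨hrpre, hrmax⟩ := rfind_spec' cs w hw h0r
    have hfv : PySem.Chars.find cs w = ((PySem.Chars.find cs w).toNat : Int) := by omega
    have hrv : PySem.Chars.rfind cs w = ((PySem.Chars.rfind cs w).toNat : Int) := by omega
    have hjfn : (PySem.Chars.find cs w).toNat < cs.length :=
      prefix_drop_lt cs w _ hw hfpre
    have hjrn : (PySem.Chars.rfind cs w).toNat < cs.length :=
      prefix_drop_lt cs w _ hw hrpre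
    have hfst : (spellStep cs (encF (firstP cs ws 0), encF (lastSeg cs ws 0)) (w, v)).1
        = encF (firstP cs (ws ++ [(w, v)]) 0) := by
      unfold spellStep
      rw [if_pos (Or.inl hfne)]
      cases hfp : firstP cs ws 0 with
      | none =>
        have hnone := (firstP_none_iff cs ws 0).mp hfp
        have hnew : firstP cs (ws ++ [(w, v)]) 0
            = some ((PySem.Chars.find cs w).toNat, PySem.Int.toChars v) := by
          rw [firstP_some_iff]
          refine ⟨Nat.zero_le _, hjfn,
            tokW_append_of_none_pre cs ws w v hw _ (hnone _ (Nat.zero_le _) hjfn) hfpre, ?_⟩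
          intro j hj hjl
          exact tokW_append_of_none cs ws w v hw j (hnone j (Nat.zero_le _) (by omega))
            (hfmin j hjl)
        rw [hnew]
        dsimp [encF]
        exact Prod.ext_iff.mpr ⟨hfv, rfl⟩
      | some p =>
        obtain ⟨m, u⟩ := p
        obtain ⟨_, hmn, htm, hmin⟩ := (firstP_some_iff cs ws 0 m u).mp hfp
        by_cases hcmp : PySem.Chars.find cs w < (m : Int)
        · have hjfm : (PySem.Chars.find cs w).toNat < m := by omega
          have hnew : firstP cs (ws ++ [(w, v)]) 0
              = some ((PySem.Chars.find cs w).toNat, PySem.Int.toChars v) := by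
            rw [firstP_some_iff]
            refine ⟨Nat.zero_le _, hjfn,
              tokW_append_of_none_pre cs ws w v hw _ (hmin _ (Nat.zero_le _) hjfm) hfpre, ?_⟩
            intro j hj hjl
            exact tokW_append_of_none cs ws w v hw j (hmin j (Nat.zero_le _) (by omega))
              (hfmin j hjl)
          rw [hnew]
          dsimp [encF]
          rw [if_pos hcmp]
          exact Prod.ext_iff.mpr ⟨hfv, rfl⟩
        · have hnew : firstP cs (ws ++ [(w, v)]) 0 = some (m, u) := by
            rw [firstP_some_iff]
            refine ⟨Nat.zero_le _, hmn, tokW_append_of_some cs ws w v hw m u htm, ?_⟩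
            intro j hj hjl
            exact tokW_append_of_none cs ws w v hw j (hmin j hj hjl) (hfmin j (by omega))
          rw [hnew]
          dsimp [encF]
          rw [if_neg hcmp]
    have hlst : (spellStep cs (encF (firstP cs ws 0), encF (lastSeg cs ws 0)) (w, v)).2
        = encF (lastSeg cs (ws ++ [(w, v)]) 0) := by
      unfold spellStep
      rw [if_pos (Or.inl hfne)]
      cases hlp : lastSeg cs ws 0 with
      | none =>
        have hnone := (lastSeg_none_iff cs ws 0).mp hlp
        have hnew : lastSeg cs (ws ++ [(w, v)]) 0
            = some ((PySem.Chars.rfind cs w).toNat, PySem.Int.toChars v) := by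
          rw [lastSeg_some_iff]
          refine ⟨Nat.zero_le _, hjrn,
            tokW_append_of_none_pre cs ws w v hw _ (hnone _ (Nat.zero_le _) hjrn) hrpre, ?_⟩
          intro j hj hjl
          exact tokW_append_of_none cs ws w v hw j (hnone j (Nat.zero_le _) hjl)
            (hrmax j hj)
        rw [hnew]
        dsimp [encF]
        exact Prod.ext_iff.mpr ⟨hrv, rfl⟩
      | some p =>
        obtain ⟨m, u⟩ := p
        obtain ⟨_, hmn, htm, hmax⟩ := (lastSeg_some_iff cs ws 0 m u).mp hlp
        by_cases hcmp : (m : Int) < PySem.Chars.rfind cs w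
        · have hjrm : m < (PySem.Chars.rfind cs w).toNat := by omega
          have hnew : lastSeg cs (ws ++ [(w, v)]) 0
              = some ((PySem.Chars.rfind cs w).toNat, PySem.Int.toChars v) := by
            rw [lastSeg_some_iff]
            refine ⟨Nat.zero_le _, hjrn,
              tokW_append_of_none_pre cs ws w v hw _ (hmax _ hjrm hjrn) hrpre, ?_⟩
            intro j hj hjl
            exact tokW_append_of_none cs ws w v hw j (hmax j (by omega) hjl)
              (hrmax j hj)
          rw [hnew]
          dsimp [encF]
          rw [if_pos hcmp]
          exact Prod.ext_iff.mpr ⟨hrv, rfl⟩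
        · have hnew : lastSeg cs (ws ++ [(w, v)]) 0 = some (m, u) := by
            rw [lastSeg_some_iff]
            refine ⟨Nat.zero_le _, hmn, tokW_append_of_some cs ws w v hw m u htm, ?_⟩
            intro j hj hjl
            refine tokW_append_of_none cs ws w v hw j (hmax j hj hjl) ?_
            intro hp
            exact hrmax j (by omega) hp
          rw [hnew]
          dsimp [encF]
          rw [if_neg hcmp]
    exact Prod.ext_iff.mpr ⟨hfst, hlst⟩


lemma spellFold (cs : List Char) (ws₂ : List (List Char × Int)) :
    ∀ ws₁, (∀ p ∈ ws₂, p.1 ≠ ([] : List Char)) →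
    ws₂.foldl (spellStep cs) (encF (firstP cs ws₁ 0), encF (lastSeg cs ws₁ 0)) =
      (encF (firstP cs (ws₁ ++ ws₂) 0), encF (lastSeg cs (ws₁ ++ ws₂) 0)) := by
  induction ws₂ with
  | nil =>
    intro ws₁ _
    simp
  | cons q rest ih =>
    intro ws₁ hq
    obtain ⟨w, v⟩ := q
    rw [List.foldl_cons, spellStep_eq cs ws₁ w v (hq (w, v) (List.mem_cons_self))]
    rw [ih (ws₁ ++ [(w, v)]) (fun p hp => hq p (List.mem_cons_of_mem _ hp))]
    simp [List.append_assoc]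


-- ---- B-side loop characterization ----
lemma bfold (cs : List Char) (k : Nat) (hk : k ≤ cs.length)
    (st : Option (List Char) × Option (List Char)) :
    (PySem.List.enumerate (cs.drop k) (k : Int)).foldl (bStep cs) st =
      ((match st.1 with
        | some a => some a
        | none => (firstP cs pvWords k).map (·.2)),
       (match lastSeg cs pvWords k with
        | some p => some p.2
        | none => st.2)) := by
  suffices H : ∀ d k st, k ≤ cs.length → cs.length - k = d →
      (PySem.List.enumerate (cs.drop k) (k : Int)).foldl (bStep cs) st =
        ((match st.1 with
          | some a => some a
          | none => (firstP cs pvWords k).map (·.2)),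
         (match lastSeg cs pvWords k with
          | some p => some p.2
          | none => st.2)) from H (cs.length - k) k st hk rfl
  intro d
  induction d with
  | zero =>
    intro k st hk hd
    have hke : k = cs.length := by omega
    subst hke
    rw [List.drop_length, PySem.List.enumerate_nil, List.foldl_nil, firstP, dif_neg (by omega),
      lastSeg, dif_neg (by omega)]
    obtain ⟨s1, s2⟩ := st
    cases s1 <;> simp
  | succ d ih =>
    intro k st hk hd
    have hklt : k < cs.length := by omega
    rw [List.drop_eq_getElem_cons hklt, PySem.List.enumerate_cons, List.foldl_cons]
    have hstep : bStep cs st ((k : Int), cs[k]) =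
        (match tokW cs pvWords k with
         | none => st
         | some t => ((match st.1 with | some a => some a | none => some t), some t)) := by
      unfold bStep tokW
      dsimp only
      rw [PySem.List.slice_from_natCast, List.getElem?_eq_getElem hklt]
    rw [hstep]
    have hcast : ((k : Int) + 1) = ((k + 1 : Nat) : Int) := by push_cast; ring
    cases htk : tokW cs pvWords k with
    | none =>
      rw [hcast, ih (k + 1) st (by omega) (by omega)]
      have hf : firstP cs pvWords k = firstP cs pvWords (k + 1) := by
        rw [firstP, dif_pos hklt, htk]
      have hl : lastSeg cs pvWords k = lastSeg cs pvWords (k + 1) := by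
        rw [lastSeg, dif_pos hklt, htk]
        cases lastSeg cs pvWords (k + 1) <;> rfl
      rw [hf, hl]
    | some t =>
      rw [hcast, ih (k + 1) _ (by omega) (by omega)]
      have hf : firstP cs pvWords k = some (k, t) := by
        rw [firstP, dif_pos hklt, htk]
      have hl : lastSeg cs pvWords k =
          (match lastSeg cs pvWords (k + 1) with
           | some p => some p
           | none => some (k, t)) := by
        rw [lastSeg, dif_pos hklt, htk]
        cases lastSeg cs pvWords (k + 1) <;> rfl
      rw [hf, hl]
      obtain ⟨s1, s2⟩ := st
      cases s1 <;> cases hls : lastSeg cs pvWords (k + 1) <;> simp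


-- ---- existence of tokens under Pre_ ----
lemma pvWords_ne_nil : ∀ p ∈ pvWords, p.1 ≠ ([] : List Char) := by decide

lemma pvWords_len_one : ∀ p ∈ pvWords, (PySem.Int.toChars p.2).length = 1 := by decide

lemma wordTok_ne_none (suffix : List Char) (ws : List (List Char × Int))
    (w : List Char) (v : Int) (hmem : (w, v) ∈ ws)
    (hsw : PySem.Chars.startswith suffix w = true) :
    wordTok suffix ws ≠ none := by
  induction ws with
  | nil => cases hmem
  | cons q rest ih =>
    obtain ⟨w', v'⟩ := q
    by_cases hs : PySem.Chars.startswith suffix w'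
    · simp [wordTok, hs]
    · rcases List.mem_cons.mp hmem with he | hm
      · rw [Prod.mk.injEq] at he
        obtain ⟨h1, h2⟩ := he
        subst h1
        exact absurd hsw hs
      · simpa [wordTok, hs] using ih hm


lemma exists_tok_of_pre (cs : List Char)
    (h : cs.any PySem.Chars.isdigit = true ∨
      pvWords.any (fun p => PySem.Chars.isIn p.1 cs) = true) :
    ∃ j, j < cs.length ∧ tokW cs pvWords j ≠ none := by
  rcases h with hd | hword
  · rw [List.any_eq_true] at hd
    obtain ⟨c, hc, hdig⟩ := hd
    obtain ⟨j, hj, hc⟩ := List.mem_iff_getElem.mp hc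
    refine ⟨j, hj, ?_⟩
    unfold tokW
    rw [List.getElem?_eq_getElem hj, hc]
    simp [hdig]
  · rw [List.any_eq_true] at hword
    obtain ⟨p, hp, hin⟩ := hword
    obtain ⟨j, hj⟩ := (PySem.Chars.exists_prefix_drop_iff_isIn p.1 cs).mpr hin
    have hplen : p.1 ≠ [] := pvWords_ne_nil p hp
    have hjn : j < cs.length := prefix_drop_lt cs p.1 j hplen hj
    refine ⟨j, hjn, ?_⟩
    unfold tokW
    rw [List.getElem?_eq_getElem hjn]
    by_cases hdig : PySem.Chars.isdigit cs[j]
    · simp [hdig]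
    · simp only [hdig, Bool.false_eq_true, if_false]
      exact wordTok_ne_none (cs.drop j) pvWords p.1 p.2 (by simpa using hp)
        ((PySem.Chars.startswith_iff _ _).mpr hj)


lemma wordTok_mem (suffix : List Char) (ws : List (List Char × Int)) (t : List Char)
    (h : wordTok suffix ws = some t) : ∃ p ∈ ws, t = PySem.Int.toChars p.2 := by
  induction ws with
  | nil => cases h
  | cons q rest ih =>
    obtain ⟨w', v'⟩ := q
    by_cases hs : PySem.Chars.startswith suffix w'
    · simp only [wordTok, hs, if_true, Option.some.injEq] at h
      exact ⟨(w', v'), List.mem_cons_self, h.symm⟩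
    · simp only [wordTok, hs, Bool.false_eq_true, if_false] at h
      obtain ⟨p, hp, ht⟩ := ih h
      exact ⟨p, List.mem_cons_of_mem _ hp, ht⟩

lemma tokW_length (cs : List Char) (i : Nat) (t : List Char)
    (h : tokW cs pvWords i = some t) : t.length = 1 := by
  have hmem1 : ∀ (suffix : List Char) (t' : List Char),
      wordTok suffix pvWords = some t' → t'.length = 1 := by
    intro suffix t' hwt
    obtain ⟨p, hp, ht⟩ := wordTok_mem suffix pvWords t' hwt
    rw [ht]
    exact pvWords_len_one p hp
  unfold tokW at h
  split at h
  · cases h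
  · rename_i c hgc
    by_cases hdig : PySem.Chars.isdigit c
    · rw [if_pos hdig] at h
      injection h with h'
      rw [← h']
      rfl
    · rw [if_neg hdig] at h
      exact hmem1 _ _ h


-- ===== VERDICT (by name: the statement is the Claim_ definition above) =====
theorem getCalValStrs_spec : Claim_equal_getCalValStrs := by
  intro line _ hpre
  unfold Spec_getCalValStrs getCalValStrs getCalValStrs_alt
  obtain ⟨hne, hex⟩ := hpre
  set cs := line.toList with hcs
  have hlen0 : ¬ (cs.length = 0) := fun h => hne (List.length_eq_zero_iff.mp h)
  dsimp only
  rw [if_neg hlen0, if_neg hlen0]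
  obtain ⟨j0, hj0, htok0⟩ := exists_tok_of_pre cs hex
  obtain ⟨fi, fv, hfp⟩ : ∃ fi fv, firstP cs pvWords 0 = some (fi, fv) := by
    cases hf : firstP cs pvWords 0 with
    | some p =>
      obtain ⟨a, b⟩ := p
      exact ⟨a, b, rfl⟩
    | none => exact absurd ((firstP_none_iff cs pvWords 0).mp hf j0 (Nat.zero_le _) hj0) htok0
  obtain ⟨li, lv, hlp⟩ : ∃ li lv, lastSeg cs pvWords 0 = some (li, lv) := by
    cases hf : lastSeg cs pvWords 0 with
    | some p =>
      obtain ⟨a, b⟩ := p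
      exact ⟨a, b, rfl⟩
    | none => exact absurd ((lastSeg_none_iff cs pvWords 0).mp hf j0 (Nat.zero_le _) hj0) htok0
  have hA1 : digitScanF (PySem.List.enumerate cs 0) = encF (firstP cs [] 0) := by
    have h := digitScanF_eq cs 0 (Nat.zero_le _)
    rwa [List.drop_zero, show ((0 : Nat) : Int) = 0 from rfl] at h
  have hrev : (PySem.List.slice? cs none none (-1)).getD [] = cs.reverse := by
    rw [PySem.List.slice?_none_none_neg_one]
    rfl
  have hA2 := digitScanL_eq cs
  have hfold := spellFold cs pvWords [] pvWords_ne_nil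
  rw [List.nil_append, hfp, hlp] at hfold
  have hB := bfold cs 0 (Nat.zero_le _) (none, none)
  rw [List.drop_zero, show ((0 : Nat) : Int) = 0 from rfl] at hB
  simp only [hfp, hlp, Option.map_some] at hB
  rw [hrev, hA1, hA2, hfold, hB]
  have hlf : fv.length = 1 :=
    tokW_length cs fi fv ((firstP_some_iff cs pvWords 0 fi fv).mp hfp).2.2.1
  have hll : lv.length = 1 :=
    tokW_length cs li lv ((lastSeg_some_iff cs pvWords 0 li lv).mp hlp).2.2.1
  dsimp [encF]
  rw [if_neg (by simp [hlf, hll])]
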